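-- pv_equiv track=rewrite | github.com/matz-d/daytrace-plugin | scripts/derived_store.py | _build_scope_mode_by_source
-- ===== SOURCE A (Python) =====
-- from typing import Any
--
-- def _build_scope_mode_by_source(observations: list[dict[str, Any]]) -> dict[str, str]:
--     scope_mode_by_source: dict[str, str] = {}
--     for observation in observations:
--         source_name = str(observation["source_name"])
--         scope_mode = observation.get("scope_mode")
--         if scope_mode and source_name not in scope_mode_by_source:
--             scope_mode_by_source[source_name] = str(scope_mode)
--     return scope_mode_by_source
-- ===== SOURCE B (Python) =====
-- def _build_scope_mode_by_source(observations):
--     # Three comprehensions: extract (name, mode) pairs, take first truthy mode per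
--     # name via a reversed-overwrite dict, then rebuild in first-occurrence order.
--     pairs = [(str(o["source_name"]), o.get("scope_mode")) for o in observations]
--     firsts = {n: str(m) for n, m in reversed(pairs) if m}
--     return {n: firsts[n] for n, m in pairs if m}
-- ===== Notes on version B (the rewrite author's own statement) =====
-- stated objective: alternative
-- what changed: Single stateful loop with a membership check is replaced by three comprehension passes: extract (name, mode) pairs, build first-truthy values by overwriting over the reversed pairs, then rebuild the dict in first-occurrence order.
import Mathlib
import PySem

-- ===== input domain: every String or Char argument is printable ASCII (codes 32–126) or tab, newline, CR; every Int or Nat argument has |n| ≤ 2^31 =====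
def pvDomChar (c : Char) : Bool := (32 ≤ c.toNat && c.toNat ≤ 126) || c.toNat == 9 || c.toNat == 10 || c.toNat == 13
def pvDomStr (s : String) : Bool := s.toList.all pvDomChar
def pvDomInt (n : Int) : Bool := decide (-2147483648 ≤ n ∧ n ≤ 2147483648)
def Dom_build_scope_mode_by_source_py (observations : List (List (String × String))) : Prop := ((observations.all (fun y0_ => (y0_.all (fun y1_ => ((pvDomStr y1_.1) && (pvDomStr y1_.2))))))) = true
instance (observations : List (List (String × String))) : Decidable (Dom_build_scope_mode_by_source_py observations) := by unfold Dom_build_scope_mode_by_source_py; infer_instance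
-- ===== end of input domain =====

-- B replaces A's single stateful loop (insert-if-absent with a membership test) by three
-- comprehension passes: (name, mode) pairs, a reversed-overwrite dict of first truthy modes,
-- and a rebuild in first-occurrence order. Same cost; a genuinely different decomposition.


-- ===== PORT A =====
def build_scope_mode_by_source_py (observations : List (List (String × String))) : List (String × String) :=
  (observations.foldl
    (fun d o =>
      -- source_name = str(observation["source_name"]): under Pre_ the key is present, so the
      -- getD "" default is never taken (it stands for the KeyError input excluded by Pre_)
      let source_name := ((PySem.Dict.mk o).get? "source_name").getD ""
      let scope_mode := (PySem.Dict.mk o).get? "scope_mode"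
      -- 'if scope_mode and source_name not in scope_mode_by_source:' (truthy string = nonempty)
      match scope_mode with
      | some m => if m ≠ "" then (if d.contains source_name then d else d.insert source_name m) else d
      | none => d)
    PySem.Dict.empty).items

-- ===== PORT B =====
-- pairs = [(str(o["source_name"]), o.get("scope_mode")) for o in observations]
def pvPairs (observations : List (List (String × String))) : List (String × Option String) :=
  observations.map (fun o =>
    (((PySem.Dict.mk o).get? "source_name").getD "", (PySem.Dict.mk o).get? "scope_mode"))

-- firsts = {n: str(m) for n, m in reversed(pairs) if m}
def pvFirsts (pairs : List (String × Option String)) : PySem.Dict String String :=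
  pairs.reverse.foldl
    (fun d p => match p.2 with
      | some m => if m ≠ "" then d.insert p.1 m else d
      | none => d)
    PySem.Dict.empty

def build_scope_mode_by_source_py_alt (observations : List (List (String × String))) : List (String × String) :=
  let pairs := pvPairs observations
  let firsts := pvFirsts pairs
  -- {n: firsts[n] for n, m in pairs if m}; the firsts[n] lookup is ported as (get? …).getD "",
  -- exact because every such n is a key of firsts (same 'if m' filter built both)
  (pairs.foldl
    (fun d p => match p.2 with
      | some m => if m ≠ "" then d.insert p.1 ((firsts.get? p.1).getD "") else d
      | none => d)
    PySem.Dict.empty).items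

-- ===== PRECONDITION & SPEC =====
-- Pre_ excludes exactly the inputs where some observation lacks a "source_name" key: there the Python A raises KeyError.
def Pre_build_scope_mode_by_source_py (observations : List (List (String × String))) : Prop :=
  ∀ o ∈ observations, o.any (fun p => p.1 == "source_name") = true
instance (observations : List (List (String × String))) : Decidable (Pre_build_scope_mode_by_source_py observations) := by unfold Pre_build_scope_mode_by_source_py; infer_instance

def pvWitness_build_scope_mode_by_source_py : (List (List (String × String))) :=
  [[("source_name", "s"), ("scope_mode", "m")], [("source_name", "t")]]

def Spec_build_scope_mode_by_source_py (observations : List (List (String × String))) (out : List (String × String)) : Prop := out = build_scope_mode_by_source_py_alt observations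
instance (observations : List (List (String × String))) (out : List (String × String)) : Decidable (Spec_build_scope_mode_by_source_py observations out) := by unfold Spec_build_scope_mode_by_source_py; infer_instance

-- ===== CLAIM (what is proved, stated in full; the proofs are below) =====
def Claim_equal_build_scope_mode_by_source_py : Prop := ∀ (observations : List (List (String × String))), Dom_build_scope_mode_by_source_py observations → Pre_build_scope_mode_by_source_py observations → Spec_build_scope_mode_by_source_py observations (build_scope_mode_by_source_py observations)

-- ===== LEMMAS AND PROOFS =====

-- the qualifying ("truthy") pairs, with their mode strings
def pvToQ (p : String × Option String) : Option (String × String) :=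
  match p.2 with
  | some m => if m ≠ "" then some (p.1, m) else none
  | none => none

-- each of the three loops, skipping non-truthy entries, is a fold over the qualifying pairs
theorem pv_foldl_skip (step : PySem.Dict String String → String × String → PySem.Dict String String) :
    ∀ (l : List (String × Option String)) (d : PySem.Dict String String),
      l.foldl (fun d p => match p.2 with
        | some m => if m ≠ "" then step d (p.1, m) else d
        | none => d) d
      = (l.filterMap pvToQ).foldl step d := by
  intro l
  induction l with
  | nil => intro d; rfl
  | cons p t ih =>
      intro d
      rcases p with ⟨n, m?⟩
      cases m? with
      | none => rw [List.foldl_cons, List.filterMap_cons]; exact ih d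
      | some m =>
          by_cases hm : m ≠ ""
          · have hq : pvToQ (n, some m) = some (n, m) := by simp [pvToQ, hm]
            rw [List.foldl_cons]
            show (t.foldl _ (if m ≠ "" then step d (n, m) else d)) = _
            rw [if_pos hm, List.filterMap_cons, hq, List.foldl_cons]
            exact ih _
          · have hq : pvToQ (n, some m) = none := by simp [pvToQ, hm]
            rw [List.foldl_cons]
            show (t.foldl _ (if m ≠ "" then step d (n, m) else d)) = _
            rw [if_neg hm, List.filterMap_cons, hq]
            exact ih d

-- lookup in the reversed-overwrite dict = first match in the association list
theorem pv_get?_revfold :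
    ∀ (q : List (String × String)) (k : String),
      ((q.reverse.foldl (fun d (p : String × String) => d.insert p.1 p.2) PySem.Dict.empty).get? k)
      = (PySem.Dict.mk q).get? k := by
  intro q
  induction q with
  | nil => intro k; rfl
  | cons a t ih =>
      intro k
      simp only [List.foldl_reverse] at ih ⊢
      rw [List.foldr_cons, PySem.Dict.get?_insert, PySem.Dict.get?_mk_cons]
      by_cases hk : k = a.1
      · simp [hk]
      · rw [if_neg hk, if_neg (by simpa using Ne.symm hk)]
        exact ih k

-- a member's key has a first match
theorem pv_get?_isSome (l : List (String × String)) (p : String × String) (h : p ∈ l) :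
    ((PySem.Dict.mk l).get? p.1).isSome := by
  induction l with
  | nil => cases h
  | cons a t ih =>
      rw [PySem.Dict.get?_mk_cons]
      by_cases hk : a.1 == p.1
      · simp [hk]
      · simp only [hk]
        rcases List.mem_cons.mp h with h1 | h1
        · subst h1; simp at hk
        · simp; exact ih h1

-- reference result: first-occurrence dedup of the qualifying pairs
def pvRef : List (String × String) → List (String × String)
  | [] => []
  | (k, v) :: t => (k, v) :: pvRef (t.filter (fun p => ¬ p.1 = k))
termination_by l => l.length
decreasing_by
  simp only [List.length_cons, List.length_unattach]
  exact Nat.lt_succ_of_le (le_trans (List.length_filter_le _ _) (by simp))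

theorem pv_filter_insert (t : List (String × String)) (d : PySem.Dict String String) (k v : String) :
    t.filter (fun p => !(d.insert k v).contains p.1)
    = (t.filter (fun p => !d.contains p.1)).filter (fun p => ¬ p.1 = k) := by
  rw [List.filter_filter]
  apply List.filter_congr
  intro p _
  rw [PySem.Dict.contains_insert]
  by_cases h1 : p.1 = k <;> by_cases h2 : d.contains p.1 <;> simp [h1, h2]

-- A's loop from any state: appends the first-occurrence dedup of the not-yet-seen keys
theorem pvA_fold :
    ∀ (q : List (String × String)) (d : PySem.Dict String String),
      (q.foldl (fun d (p : String × String) =>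
        if d.contains p.1 then d else d.insert p.1 p.2) d).items
      = d.items ++ pvRef (q.filter (fun p => !d.contains p.1)) := by
  intro q
  induction q with
  | nil => intro d; simp [pvRef]
  | cons a t ih =>
      intro d
      rcases a with ⟨k, v⟩
      rw [List.foldl_cons, List.filter_cons]
      by_cases hc : d.contains k
      · rw [if_pos hc, if_neg (by simp [hc]), ih d]
      · rw [if_neg hc, if_pos (by simp [Bool.eq_false_iff.mpr hc]), ih (d.insert k v),
            PySem.Dict.items_insert_of_not_contains _ _ (Bool.eq_false_iff.mpr hc),
            pv_filter_insert t d k v]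
        conv_rhs => rw [pvRef.eq_def]
        simp

-- re-inserting an existing key with its current value is a no-op
theorem pv_insert_self (d : PySem.Dict String String) (k v : String)
    (hnd : d.keys.Nodup) (h : d.get? k = some v) : d.insert k v = d := by
  have hc : d.contains k = true := by rw [PySem.Dict.contains_eq_isSome_get?, h]; rfl
  apply PySem.Dict.ext
  rw [PySem.Dict.items_insert_of_contains _ _ hc]
  rw [List.map_congr_left (g := fun a => a) ?_]; exact List.map_id' d.items
  intro p hp
  by_cases hk : p.1 == k
  · have hpk : p.1 = k := by simpa using hk
    have hmem : (p.1, p.2) ∈ d.items := by simpa using hp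
    have hv : d.get? p.1 = some p.2 := PySem.Dict.get?_of_mem_items _ hmem hnd
    rw [hpk, h] at hv
    have : p.2 = v := by simpa using hv.symm
    simp [← hpk, ← this]
  · simp [hk]

-- B's rebuild loop: inserting G of each key, where G is the first-match value, gives the same dedup
theorem pvB_fold (G : String → String) :
    ∀ (q : List (String × String)) (d : PySem.Dict String String), d.keys.Nodup →
      (∀ k w, d.get? k = some w → w = G k) →
      (∀ p ∈ q, d.contains p.1 = false → some (G p.1) = (PySem.Dict.mk q).get? p.1) →
      (q.foldl (fun d (p : String × String) => d.insert p.1 (G p.1)) d).items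
      = d.items ++ pvRef (q.filter (fun p => !d.contains p.1)) := by
  intro q
  induction q with
  | nil => intro d _ _ _; simp [pvRef]
  | cons a t ih =>
      intro d hnd hG hq
      rcases a with ⟨k, v⟩
      rw [List.foldl_cons, List.filter_cons]
      by_cases hc : d.contains k
      · -- re-insert of an existing key with its own value: a no-op
        have hsome : ∃ w, d.get? k = some w := by
          have := hc
          rw [PySem.Dict.contains_eq_isSome_get?] at this
          exact Option.isSome_iff_exists.mp this
        rcases hsome with ⟨w, hw⟩
        have hwG : w = G k := hG k w hw
        rw [show d.insert k (G k) = d from hwG ▸ pv_insert_self d k w hnd (hwG ▸ hw)]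
        rw [if_neg (by simp [hc]), ih d hnd hG ?_]
        intro p hp hpc
        have hne : ¬ (k == p.1) := by
          intro hb
          have : k = p.1 := by simpa using hb
          rw [← this] at hpc; rw [hpc] at hc; simp at hc
        have := hq p (List.mem_cons_of_mem _ hp) hpc
        rwa [PySem.Dict.get?_mk_cons, if_neg (by simpa using hne)] at this
      · -- fresh key: G k is the head value v
        have hGk : G k = v := by
          have := hq (k, v) (List.mem_cons_self) (Bool.eq_false_iff.mpr hc)
          rw [PySem.Dict.get?_mk_cons, if_pos (by simp)] at this
          simpa using this
        rw [if_pos (by simp [Bool.eq_false_iff.mpr hc]), hGk,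
            ih (d.insert k v) (PySem.Dict.nodup_keys_insert _ _ _ hnd) ?_ ?_,
            PySem.Dict.items_insert_of_not_contains _ _ (Bool.eq_false_iff.mpr hc),
            pv_filter_insert t d k v]
        · conv_rhs => rw [pvRef.eq_def]
          simp
        · intro k' w hw
          rw [PySem.Dict.get?_insert] at hw
          by_cases hk' : k' = k
          · rw [if_pos hk'] at hw
            rw [hk', hGk]; simpa using hw.symm
          · rw [if_neg hk'] at hw
            exact hG k' w hw
        · intro p hp hpc
          rw [PySem.Dict.contains_insert] at hpc
          have h1 : ¬ (p.1 == k) := by intro hb; rw [hb] at hpc; simp at hpc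
          have h2 : d.contains p.1 = false := by
            cases hdc : d.contains p.1
            · rfl
            · rw [hdc] at hpc; simp at hpc
          have := hq p (List.mem_cons_of_mem _ hp) h2
          rwa [PySem.Dict.get?_mk_cons, if_neg (by simpa using fun h => h1 (by simp [h]))] at this

-- ===== VERDICT (by name: the statement is the Claim_ definition above) =====
theorem build_scope_mode_by_source_py_spec : Claim_equal_build_scope_mode_by_source_py := by
  intro observations _ _
  unfold Spec_build_scope_mode_by_source_py
  -- both programs, rewritten as folds over the qualifying pairs
  have hA : build_scope_mode_by_source_py observations
      = (((pvPairs observations).filterMap pvToQ).foldl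
          (fun d (p : String × String) => if d.contains p.1 then d else d.insert p.1 p.2)
          PySem.Dict.empty).items := by
    refine congrArg PySem.Dict.items ?_
    exact (List.foldl_map).symm.trans
      (pv_foldl_skip (fun d (p : String × String) => if d.contains p.1 then d else d.insert p.1 p.2)
        (pvPairs observations) PySem.Dict.empty)
  have hB : build_scope_mode_by_source_py_alt observations
      = (((pvPairs observations).filterMap pvToQ).foldl
          (fun d (p : String × String) =>
            d.insert p.1 (((pvFirsts (pvPairs observations)).get? p.1).getD ""))
          PySem.Dict.empty).items := by
    refine congrArg PySem.Dict.items ?_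
    exact pv_foldl_skip
      (fun d (p : String × String) =>
        d.insert p.1 (((pvFirsts (pvPairs observations)).get? p.1).getD ""))
      (pvPairs observations) PySem.Dict.empty
  have hFirst : ∀ k, (pvFirsts (pvPairs observations)).get? k
      = (PySem.Dict.mk ((pvPairs observations).filterMap pvToQ)).get? k := by
    intro k
    have h1 : pvFirsts (pvPairs observations)
        = ((pvPairs observations).filterMap pvToQ).reverse.foldl
            (fun d (p : String × String) => d.insert p.1 p.2) PySem.Dict.empty := by
      refine Eq.trans (pv_foldl_skip (fun d (p : String × String) => d.insert p.1 p.2)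
        (pvPairs observations).reverse PySem.Dict.empty) ?_
      rw [List.filterMap_reverse]
    rw [h1]
    exact pv_get?_revfold _ k
  rw [hA, hB, pvA_fold]
  refine Eq.symm (pvB_fold (fun k => ((pvFirsts (pvPairs observations)).get? k).getD "")
      ((pvPairs observations).filterMap pvToQ) PySem.Dict.empty PySem.Dict.nodup_keys_empty ?_ ?_)
  · intro k w hw
    rw [PySem.Dict.get?_empty] at hw
    cases hw
  · intro p hp _
    show some (((pvFirsts (pvPairs observations)).get? p.1).getD "") = _
    rw [hFirst p.1]
    obtain ⟨w, hw⟩ := Option.isSome_iff_exists.mp (pv_get?_isSome _ p hp)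
    rw [hw]
    rfl
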